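-- pv_equiv track=rewrite | github.com/C-L-A-X-O-N/TraCI-script | simulation/simulation_getter.py | classify_lane
-- ===== SOURCE A (Python) =====
-- def classify_lane(allowed):
--     if any(v in allowed for v in ["passenger", "private", "hov", "vip", "evehicle", "taxi"]):
--         return "car"
--     if any(v in allowed for v in ["bus", "coach"]):
--         return "public_transport"
--     if any(v in allowed for v in ["tram"]):
--         return "train"
--     if any(v in allowed for v in ["motorcycle", "moped"]):
--         return "2_wheeler"
--     if "bicycle" in allowed:
--         return "bike"
--     if "pedestrian" in allowed:
--         return "pedestrian"
--     return "unknown"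
-- ===== SOURCE B (Python) =====
-- _PRIORITY = {
--     "passenger": (0, "car"), "private": (0, "car"), "hov": (0, "car"),
--     "vip": (0, "car"), "evehicle": (0, "car"), "taxi": (0, "car"),
--     "bus": (1, "public_transport"), "coach": (1, "public_transport"),
--     "tram": (2, "train"),
--     "motorcycle": (3, "2_wheeler"), "moped": (3, "2_wheeler"),
--     "bicycle": (4, "bike"),
--     "pedestrian": (5, "pedestrian"),
-- }
--
--
-- def classify_lane(allowed):
--     # One pass over `allowed`, keeping the best-ranked class seen so far.
--     best = (7, "unknown")
--     for v in allowed: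
--         p = _PRIORITY.get(v)
--         if p is not None and p[0] < best[0]:
--             best = p
--     return best[1]
-- ===== Notes on version B (the rewrite author's own statement) =====
-- stated objective: faster
-- what changed: A scans `allowed` once per vehicle-class group through a six-branch if-ladder; B makes a single pass over `allowed`, looking each element up in a priority table and keeping the best-ranked (priority, label) pair seen.
import Mathlib
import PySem

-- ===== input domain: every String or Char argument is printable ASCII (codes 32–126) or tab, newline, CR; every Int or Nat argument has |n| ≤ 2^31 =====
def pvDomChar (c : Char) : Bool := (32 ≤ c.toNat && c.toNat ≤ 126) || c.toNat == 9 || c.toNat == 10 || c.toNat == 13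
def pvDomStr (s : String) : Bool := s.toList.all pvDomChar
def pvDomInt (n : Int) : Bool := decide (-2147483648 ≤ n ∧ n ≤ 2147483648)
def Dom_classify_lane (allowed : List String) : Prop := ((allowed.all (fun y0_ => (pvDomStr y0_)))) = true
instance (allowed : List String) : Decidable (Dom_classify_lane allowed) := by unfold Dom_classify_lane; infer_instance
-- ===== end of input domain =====

-- B replaces A's six group-membership scans by a single pass over `allowed` that keeps the
-- best-priority class seen so far (objective: alternative traversal; same return value).

-- ===== PORT A =====
def classify_lane (allowed : List String) : String :=
  if (["passenger", "private", "hov", "vip", "evehicle", "taxi"].any fun v => allowed.contains v) then "car"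
  else if (["bus", "coach"].any fun v => allowed.contains v) then "public_transport"
  else if (["tram"].any fun v => allowed.contains v) then "train"
  else if (["motorcycle", "moped"].any fun v => allowed.contains v) then "2_wheeler"
  else if allowed.contains "bicycle" then "bike"
  else if allowed.contains "pedestrian" then "pedestrian"
  else "unknown"

-- ===== PORT B =====
-- the module-level dict _PRIORITY of Source B
def pvPriority : PySem.Dict String (Int × String) := PySem.Dict.mk
  [("passenger", (0, "car")), ("private", (0, "car")), ("hov", (0, "car")),
   ("vip", (0, "car")), ("evehicle", (0, "car")), ("taxi", (0, "car")),
   ("bus", (1, "public_transport")), ("coach", (1, "public_transport")),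
   ("tram", (2, "train")),
   ("motorcycle", (3, "2_wheeler")), ("moped", (3, "2_wheeler")),
   ("bicycle", (4, "bike")),
   ("pedestrian", (5, "pedestrian"))]

def classify_lane_alt (allowed : List String) : String :=
  (allowed.foldl (fun best v =>
      match PySem.Dict.get? pvPriority v with
      | some p => if p.1 < best.1 then p else best
      | none => best) ((7 : Int), "unknown")).2

-- ===== PRECONDITION & SPEC =====
def Spec_classify_lane (allowed : List String) (out : String) : Prop := out = classify_lane_alt allowed
instance (allowed : List String) (out : String) : Decidable (Spec_classify_lane allowed out) := by unfold Spec_classify_lane; infer_instance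

-- ===== CLAIM (what is proved, stated in full; the proofs are below) =====
def Claim_equal_classify_lane : Prop := ∀ (allowed : List String), Dom_classify_lane allowed → Spec_classify_lane allowed (classify_lane allowed)

-- ===== LEMMAS AND PROOFS =====

-- rank of one vehicle class: its priority in the table, 7 if absent
def pvRank (v : String) : Int :=
  match PySem.Dict.get? pvPriority v with
  | some p => p.1
  | none => 7

-- the label attached to a priority
def pvLab (k : Int) : String :=
  if k = 0 then "car" else if k = 1 then "public_transport" else if k = 2 then "train"
  else if k = 3 then "2_wheeler" else if k = 4 then "bike" else if k = 5 then "pedestrian"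
  else "unknown"

-- minimum rank over a list
def pvMinr : List String → Int
  | [] => 7
  | v :: l => min (pvRank v) (pvMinr l)

-- all vehicle classes the table knows
def pvAll : List String :=
  ["passenger", "private", "hov", "vip", "evehicle", "taxi", "bus", "coach", "tram",
   "motorcycle", "moped", "bicycle", "pedestrian"]

-- first-match lookup in a literal dict yields one of its entries
theorem pvGet_mem (es : List (String × (Int × String))) (v : String) (p : Int × String)
    (h : PySem.Dict.get? (PySem.Dict.mk es) v = some p) : (v, p) ∈ es := by
  induction es with
  | nil => simp [PySem.Dict.get?] at h
  | cons e es ih =>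
    obtain ⟨k, w⟩ := e
    rw [PySem.Dict.get?_mk_cons] at h
    by_cases hc : (k == v) = true
    · rw [if_pos hc] at h
      injection h with h
      have hk := eq_of_beq hc
      subst hk; subst h
      exact List.mem_cons_self
    · rw [if_neg hc] at h
      exact List.mem_cons_of_mem _ (ih h)

theorem pvGet_shape (v : String) (p : Int × String) (h : PySem.Dict.get? pvPriority v = some p) :
    p.2 = pvLab p.1 ∧ 0 ≤ p.1 ∧ p.1 ≤ 5 := by
  unfold pvPriority at h
  have hm := pvGet_mem _ v p h
  simp only [List.mem_cons, Prod.mk.injEq, List.not_mem_nil, or_false] at hm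
  rcases hm with ⟨rfl, rfl⟩|⟨rfl, rfl⟩|⟨rfl, rfl⟩|⟨rfl, rfl⟩|⟨rfl, rfl⟩|⟨rfl, rfl⟩|⟨rfl, rfl⟩|⟨rfl, rfl⟩|⟨rfl, rfl⟩|⟨rfl, rfl⟩|⟨rfl, rfl⟩|⟨rfl, rfl⟩|⟨rfl, rfl⟩ <;> exact ⟨by decide, by decide, by decide⟩

theorem pvRank_seven (v : String) (hnm : v ∉ pvAll) : pvRank v = 7 := by
  unfold pvRank
  rcases hg : PySem.Dict.get? pvPriority v with _ | p
  · rfl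
  · exfalso
    apply hnm
    unfold pvPriority at hg
    have hm := pvGet_mem _ v p hg
    simp only [List.mem_cons, Prod.mk.injEq, List.not_mem_nil, or_false] at hm
    rcases hm with ⟨rfl, rfl⟩|⟨rfl, rfl⟩|⟨rfl, rfl⟩|⟨rfl, rfl⟩|⟨rfl, rfl⟩|⟨rfl, rfl⟩|⟨rfl, rfl⟩|⟨rfl, rfl⟩|⟨rfl, rfl⟩|⟨rfl, rfl⟩|⟨rfl, rfl⟩|⟨rfl, rfl⟩|⟨rfl, rfl⟩ <;> decide

theorem pvGroup (j : Int) (grp : List String) (hj : j ≠ 7)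
    (hfwd : ∀ w ∈ pvAll, (pvRank w = j ↔ w ∈ grp)) (hsub : ∀ w ∈ grp, w ∈ pvAll)
    (v : String) : pvRank v = j ↔ v ∈ grp := by
  by_cases hm : v ∈ pvAll
  · exact hfwd v hm
  · have h7 := pvRank_seven v hm
    constructor
    · intro h; rw [h7] at h; exact absurd h hj.symm
    · intro h; exact absurd (hsub v h) hm

theorem pvGroup0 (v : String) :
    pvRank v = 0 ↔ v ∈ ["passenger", "private", "hov", "vip", "evehicle", "taxi"] :=
  pvGroup 0 _ (by decide) (by intro w hw; fin_cases hw <;> decide)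
    (by intro w hw; fin_cases hw <;> decide) v

theorem pvGroup1 (v : String) : pvRank v = 1 ↔ v ∈ ["bus", "coach"] :=
  pvGroup 1 _ (by decide) (by intro w hw; fin_cases hw <;> decide)
    (by intro w hw; fin_cases hw <;> decide) v

theorem pvGroup2 (v : String) : pvRank v = 2 ↔ v ∈ ["tram"] :=
  pvGroup 2 _ (by decide) (by intro w hw; fin_cases hw <;> decide)
    (by intro w hw; fin_cases hw <;> decide) v

theorem pvGroup3 (v : String) : pvRank v = 3 ↔ v ∈ ["motorcycle", "moped"] :=
  pvGroup 3 _ (by decide) (by intro w hw; fin_cases hw <;> decide)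
    (by intro w hw; fin_cases hw <;> decide) v

theorem pvGroup4 (v : String) : pvRank v = 4 ↔ v ∈ ["bicycle"] :=
  pvGroup 4 _ (by decide) (by intro w hw; fin_cases hw <;> decide)
    (by intro w hw; fin_cases hw <;> decide) v

theorem pvGroup5 (v : String) : pvRank v = 5 ↔ v ∈ ["pedestrian"] :=
  pvGroup 5 _ (by decide) (by intro w hw; fin_cases hw <;> decide)
    (by intro w hw; fin_cases hw <;> decide) v

theorem pvRank_nonneg (v : String) : 0 ≤ pvRank v := by
  unfold pvRank
  split
  · exact (pvGet_shape v _ (by assumption)).2.1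
  · norm_num

theorem pvRank_vals (v : String) : pvRank v = 7 ∨ (0 ≤ pvRank v ∧ pvRank v ≤ 5) := by
  unfold pvRank
  rcases hg : PySem.Dict.get? pvPriority v with _ | p
  · left; rfl
  · right; exact (pvGet_shape v p hg).2

theorem pvMinr_le_seven (l : List String) : pvMinr l ≤ 7 := by
  induction l with
  | nil => simp [pvMinr]
  | cons v l ih => simp [pvMinr]; right; exact ih

theorem pvMinr_nonneg (l : List String) : 0 ≤ pvMinr l := by
  induction l with
  | nil => simp [pvMinr]
  | cons v l ih => simp [pvMinr]; exact ⟨pvRank_nonneg v, ih⟩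

theorem pvMinr_le_of_mem {l : List String} {v : String} (h : v ∈ l) : pvMinr l ≤ pvRank v := by
  induction l with
  | nil => cases h
  | cons w l ih =>
    rcases List.mem_cons.1 h with rfl | h
    · simp [pvMinr]
    · simp [pvMinr]; right; exact ih h

theorem pvMinr_attained {l : List String} (h : pvMinr l ≠ 7) : ∃ v ∈ l, pvRank v = pvMinr l := by
  induction l with
  | nil => simp [pvMinr] at h
  | cons w l ih =>
    by_cases hc : pvRank w ≤ pvMinr l
    · exact ⟨w, List.mem_cons_self, by simp [pvMinr, min_eq_left hc]⟩
    · push Not at hc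
      have hm : pvMinr (w :: l) = pvMinr l := by simp [pvMinr, min_eq_right (le_of_lt hc)]
      have hne : pvMinr l ≠ 7 := by rw [hm] at h; exact h
      obtain ⟨v, hv, hr⟩ := ih hne
      exact ⟨v, List.mem_cons_of_mem _ hv, by rw [hr, hm]⟩

-- the fold of B computes (min k (pvMinr l), its label) from any state (k, pvLab k) with k ≤ 7
theorem pvFold_eq (l : List String) : ∀ k : Int, k ≤ 7 →
    l.foldl (fun best v =>
      match PySem.Dict.get? pvPriority v with
      | some p => if p.1 < best.1 then p else best
      | none => best) (k, pvLab k)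
    = (min k (pvMinr l), pvLab (min k (pvMinr l))) := by
  induction l with
  | nil => intro k hk; simp [pvMinr, min_eq_left (by omega : k ≤ (7:Int))]
  | cons v l ih =>
    intro k hk
    have hstep : (match PySem.Dict.get? pvPriority v with
        | some p => if p.1 < (k, pvLab k).1 then p else (k, pvLab k)
        | none => (k, pvLab k)) = (min k (pvRank v), pvLab (min k (pvRank v))) := by
      rcases hg : PySem.Dict.get? pvPriority v with _ | p
      · have : pvRank v = 7 := by unfold pvRank; rw [hg]
        simp [this, min_eq_left hk]
      · obtain ⟨hlab, _, _⟩ := pvGet_shape v p hg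
        have hr : pvRank v = p.1 := by unfold pvRank; rw [hg]
        by_cases hlt : p.1 < k
        · simp [hlt, hr, min_eq_right (le_of_lt hlt), ← hlab]
        · simp [hlt, hr, min_eq_left (by omega : k ≤ p.1)]
    rw [List.foldl_cons, hstep, ih (min k (pvRank v)) (by have := hk; omega)]
    have : min (min k (pvRank v)) (pvMinr l) = min k (pvMinr (v :: l)) := by
      simp [pvMinr, min_assoc]
    rw [this]

theorem pvAlt_eq_lab (l : List String) : classify_lane_alt l = pvLab (pvMinr l) := by
  unfold classify_lane_alt
  have h7 : ((7 : Int), "unknown") = ((7 : Int), pvLab 7) := by norm_num [pvLab]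
  rw [h7, pvFold_eq l 7 le_rfl, min_eq_right (pvMinr_le_seven l)]

-- an `any`-over-a-group condition of A holds iff some element of the matching rank occurs
theorem pvRank_mem_iff (l : List String) (j : Int) (grp : List String)
    (hgrp : ∀ v : String, pvRank v = j ↔ v ∈ grp) :
    (grp.any fun v => l.contains v) = true ↔ ∃ v ∈ l, pvRank v = j := by
  simp only [List.any_eq_true, List.contains_iff_mem]
  constructor
  · rintro ⟨v, hvg, hvl⟩; exact ⟨v, hvl, (hgrp v).2 hvg⟩
  · rintro ⟨v, hvl, hvr⟩; exact ⟨v, (hgrp v).1 hvr, hvl⟩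

theorem pvA_eq_lab (l : List String) : classify_lane l = pvLab (pvMinr l) := by
  have h0 := pvRank_mem_iff l 0 _ pvGroup0
  have h1 := pvRank_mem_iff l 1 _ pvGroup1
  have h2 := pvRank_mem_iff l 2 _ pvGroup2
  have h3 := pvRank_mem_iff l 3 _ pvGroup3
  have h4 : (l.contains "bicycle" = true) ↔ ∃ v ∈ l, pvRank v = 4 := by
    simpa using pvRank_mem_iff l 4 _ pvGroup4
  have h5 : (l.contains "pedestrian" = true) ↔ ∃ v ∈ l, pvRank v = 5 := by
    simpa using pvRank_mem_iff l 5 _ pvGroup5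
  have key : ∀ j : Int, (∃ v ∈ l, pvRank v = j) → pvMinr l ≤ j := by
    rintro j ⟨v, hv, hr⟩; rw [← hr]; exact pvMinr_le_of_mem hv
  unfold classify_lane
  rcases eq_or_ne (pvMinr l) 7 with hm | hm
  · -- no known class occurs: every condition of A is false
    have hnone : ∀ j : Int, j ≤ 5 → ¬ ∃ v ∈ l, pvRank v = j := by
      intro j hj h; have := key j h; omega
    rw [if_neg (fun hc => hnone 0 (by norm_num) (h0.1 hc)),
        if_neg (fun hc => hnone 1 (by norm_num) (h1.1 hc)),
        if_neg (fun hc => hnone 2 (by norm_num) (h2.1 hc)),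
        if_neg (fun hc => hnone 3 (by norm_num) (h3.1 hc)),
        if_neg (fun hc => hnone 4 (by norm_num) (h4.1 hc)),
        if_neg (fun hc => hnone 5 (by norm_num) (h5.1 hc))]
    simp [pvLab, hm]
  · obtain ⟨v, hv, hr⟩ := pvMinr_attained hm
    have hlow : ∀ j : Int, j < pvMinr l → ¬ ∃ w ∈ l, pvRank w = j := by
      intro j hj h; have := key j h; omega
    have hb2 : pvMinr l ≤ 5 := by
      have h7 := pvMinr_le_seven l
      have hle := pvMinr_le_of_mem hv
      rcases pvRank_vals v with hx | hx <;> omega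
    have hb1 := pvMinr_nonneg l
    obtain h | h | h | h | h | h : pvMinr l = 0 ∨ pvMinr l = 1 ∨ pvMinr l = 2 ∨
        pvMinr l = 3 ∨ pvMinr l = 4 ∨ pvMinr l = 5 := by omega
    · rw [if_pos (h0.2 ⟨v, hv, by rw [hr, h]⟩)]; simp [pvLab, h]
    · rw [if_neg (fun hc => hlow 0 (by omega) (h0.1 hc)),
          if_pos (h1.2 ⟨v, hv, by rw [hr, h]⟩)]; simp [pvLab, h]
    · rw [if_neg (fun hc => hlow 0 (by omega) (h0.1 hc)),
          if_neg (fun hc => hlow 1 (by omega) (h1.1 hc)),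
          if_pos (h2.2 ⟨v, hv, by rw [hr, h]⟩)]; simp [pvLab, h]
    · rw [if_neg (fun hc => hlow 0 (by omega) (h0.1 hc)),
          if_neg (fun hc => hlow 1 (by omega) (h1.1 hc)),
          if_neg (fun hc => hlow 2 (by omega) (h2.1 hc)),
          if_pos (h3.2 ⟨v, hv, by rw [hr, h]⟩)]; simp [pvLab, h]
    · rw [if_neg (fun hc => hlow 0 (by omega) (h0.1 hc)),
          if_neg (fun hc => hlow 1 (by omega) (h1.1 hc)),
          if_neg (fun hc => hlow 2 (by omega) (h2.1 hc)),
          if_neg (fun hc => hlow 3 (by omega) (h3.1 hc)),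
          if_pos (h4.2 ⟨v, hv, by rw [hr, h]⟩)]; simp [pvLab, h]
    · rw [if_neg (fun hc => hlow 0 (by omega) (h0.1 hc)),
          if_neg (fun hc => hlow 1 (by omega) (h1.1 hc)),
          if_neg (fun hc => hlow 2 (by omega) (h2.1 hc)),
          if_neg (fun hc => hlow 3 (by omega) (h3.1 hc)),
          if_neg (fun hc => hlow 4 (by omega) (h4.1 hc)),
          if_pos (h5.2 ⟨v, hv, by rw [hr, h]⟩)]; simp [pvLab, h]

-- ===== VERDICT (by name: the statement is the Claim_ definition above) =====
theorem classify_lane_spec : Claim_equal_classify_lane := by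
  intro allowed _
  unfold Spec_classify_lane
  rw [pvA_eq_lab, pvAlt_eq_lab]
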